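-- pv_equiv track=rewrite | github.com/HengyueGao/FPGA-Par | FPGA-Par.py | transformAdjHashTo3List
-- ===== SOURCE A (Python) =====
-- def transformAdjHashTo3List(adj_hash):
--     adj = []
--     xadj = [0]
--     w = []
--
--     xadj_head = 0
--     for node_no in range(len(adj_hash)):
--         adj_counts = len(adj_hash[node_no])
--         for adj_node_no in adj_hash[node_no].keys():
--             adj.append(adj_node_no)
--             w.append(adj_hash[node_no][adj_node_no])
--         xadj.append(xadj_head + adj_counts)
--         xadj_head += adj_counts
--
--     return adj,xadj,w
-- ===== SOURCE B (Python) =====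
-- def transformAdjHashTo3List(adj_hash):
--     # Back-to-front CSR construction: preallocate the edge arrays, fill them with a
--     # single descending write pointer, and record xadj entries as pointer snapshots.
--     n = len(adj_hash)
--     total = sum(len(d) for d in adj_hash)
--     adj = [0] * total
--     w = [0] * total
--     xadj = [0] * (n + 1)
--     xadj[n] = total
--     p = total
--     for i in range(n - 1, -1, -1):
--         for k, v in reversed(adj_hash[i].items()):
--             p -= 1
--             adj[p] = k
--             w[p] = v
--         xadj[i] = p
--     return adj, xadj, w
-- ===== Notes on version B (the rewrite author's own statement) =====
-- stated objective: alternative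
-- what changed: B constructs the CSR back-to-front: it preallocates the adj/w arrays at the total edge count and fills them by index with a single descending write pointer (iterating nodes and each dict's items in reverse), recording each xadj entry as a snapshot of the pointer, instead of A's forward loop that appends edge by edge and maintains a running xadj head.
import Mathlib
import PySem

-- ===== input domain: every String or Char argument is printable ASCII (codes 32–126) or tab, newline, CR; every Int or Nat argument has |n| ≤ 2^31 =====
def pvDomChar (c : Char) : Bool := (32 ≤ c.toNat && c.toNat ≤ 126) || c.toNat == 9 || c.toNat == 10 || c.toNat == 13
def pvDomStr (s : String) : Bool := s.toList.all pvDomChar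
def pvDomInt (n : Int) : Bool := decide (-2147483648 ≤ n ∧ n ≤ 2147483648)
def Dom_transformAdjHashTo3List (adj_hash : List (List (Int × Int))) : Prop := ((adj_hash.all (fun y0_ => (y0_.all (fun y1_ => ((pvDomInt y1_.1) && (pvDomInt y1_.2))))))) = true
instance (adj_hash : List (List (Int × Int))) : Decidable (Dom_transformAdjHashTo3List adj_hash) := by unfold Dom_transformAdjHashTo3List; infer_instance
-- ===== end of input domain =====

-- B rebuilds the CSR back-to-front: preallocated edge arrays filled by a descending write pointer whose snapshots are the xadj entries (alternative algorithm; same cost).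


-- ===== PORT A =====
-- Each inner list is a Python dict, normalized with PySem.Dict.ofList (duplicate keys: first position, last value).
def transformAdjHashTo3List (adj_hash : List (List (Int × Int))) : List Int × List Int × List Int :=
  let fin := adj_hash.foldl
    (fun (st : List Int × List Int × List Int × Int) d_raw =>
      let d := PySem.Dict.ofList d_raw
      let adj_counts : Int := d.size
      let inner := d.keys.foldl
        (fun (p : List Int × List Int) k => (p.1 ++ [k], p.2 ++ [d.getD k 0]))
        (st.1, st.2.2.1)
      (inner.1, st.2.1 ++ [st.2.2.2 + adj_counts], inner.2, st.2.2.2 + adj_counts))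
    ([], [0], [], 0)
  (fin.1, fin.2.1, fin.2.2.1)

-- ===== PORT B =====
-- inner loop body: p -= 1; adj[p] = k; w[p] = v   (state: adj, w, p)
def pvInnerB (q : List Int × List Int × Int) (kv : Int × Int) : List Int × List Int × Int :=
  let p := q.2.2 - 1
  (PySem.List.pySetD q.1 p kv.1, PySem.List.pySetD q.2.1 p kv.2, p)

-- outer loop body over node index i (state: adj, w, xadj, p)
def pvStepB (adj_hash : List (List (Int × Int))) (st : List Int × List Int × List Int × Int)
    (i : Int) : List Int × List Int × List Int × Int :=
  let d := PySem.Dict.ofList (PySem.List.pyGetD adj_hash i [])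
  let inner := d.items.reverse.foldl pvInnerB (st.1, st.2.1, st.2.2.2)
  (inner.1, inner.2.1, PySem.List.pySetD st.2.2.1 i inner.2.2, inner.2.2)

def transformAdjHashTo3List_alt (adj_hash : List (List (Int × Int))) : List Int × List Int × List Int :=
  let n : Int := adj_hash.length
  let total : Int := (adj_hash.map (fun l => ((PySem.Dict.ofList l).size : Int))).sum
  let adj0 := List.replicate total.toNat (0 : Int)
  let w0 := List.replicate total.toNat (0 : Int)
  let xadj0 := PySem.List.pySetD (List.replicate (n.toNat + 1) (0 : Int)) n total
  let fin := (PySem.List.pyRange (n - 1) (-1) (-1)).foldl (pvStepB adj_hash) (adj0, w0, xadj0, total)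
  (fin.1, fin.2.2.1, fin.2.1)

-- ===== PRECONDITION & SPEC =====
def Spec_transformAdjHashTo3List (adj_hash : List (List (Int × Int))) (out : List Int × List Int × List Int) : Prop := out = transformAdjHashTo3List_alt adj_hash
instance (adj_hash : List (List (Int × Int))) (out : List Int × List Int × List Int) : Decidable (Spec_transformAdjHashTo3List adj_hash out) := by unfold Spec_transformAdjHashTo3List; infer_instance

-- ===== CLAIM (what is proved, stated in full; the proofs are below) =====
def Claim_equal_transformAdjHashTo3List : Prop := ∀ (adj_hash : List (List (Int × Int))), Dom_transformAdjHashTo3List adj_hash → Spec_transformAdjHashTo3List adj_hash (transformAdjHashTo3List adj_hash)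

-- ===== LEMMAS AND PROOFS =====

-- prefix sums of a count list starting at h (shape of A's running xadj tail)
def pvPS (cs : List Int) (h : Int) : List Int :=
  match cs with
  | [] => []
  | c :: t => (h + c) :: pvPS t (h + c)

-- starting offsets (exclusive prefix sums) of a count list
def pvOffs : List Int → List Int
  | [] => []
  | c :: t => 0 :: (pvOffs t).map (c + ·)

-- total edge count as a Nat
def pvSN (xs : List (List (Int × Int))) : Nat :=
  (xs.map (fun l => (PySem.Dict.ofList l).items.length)).sum

theorem pv_inner_fold (ks : List Int) (f : Int → Int) (adj w : List Int) :
    ks.foldl (fun (p : List Int × List Int) k => (p.1 ++ [k], p.2 ++ [f k])) (adj, w)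
      = (adj ++ ks, w ++ ks.map f) := by
  induction ks generalizing adj w with
  | nil => simp
  | cons k t ih => simp [List.foldl_cons, ih]

theorem pv_A_fold (l : List (List (Int × Int))) (adj xadj w : List Int) (h : Int) :
    l.foldl
      (fun (st : List Int × List Int × List Int × Int) d_raw =>
        let d := PySem.Dict.ofList d_raw
        let adj_counts : Int := d.size
        let inner := d.keys.foldl
          (fun (p : List Int × List Int) k => (p.1 ++ [k], p.2 ++ [d.getD k 0]))
          (st.1, st.2.2.1)
        (inner.1, st.2.1 ++ [st.2.2.2 + adj_counts], inner.2, st.2.2.2 + adj_counts))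
      (adj, xadj, w, h)
    = (adj ++ (l.map PySem.Dict.ofList).flatMap PySem.Dict.keys,
       xadj ++ pvPS ((l.map PySem.Dict.ofList).map (fun d => (d.size : Int))) h,
       w ++ (l.map PySem.Dict.ofList).flatMap PySem.Dict.values,
       h + (((l.map PySem.Dict.ofList).map (fun d => (d.size : Int))).sum)) := by
  induction l generalizing adj xadj w h with
  | nil => simp [pvPS]
  | cons d_raw t ih =>
    simp only [List.foldl_cons]
    rw [pv_inner_fold]
    rw [← (PySem.Dict.ofList d_raw).values_eq_map_keys (PySem.Dict.nodup_keys_ofList d_raw) 0]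
    rw [ih]
    simp [pvPS, List.flatMap_cons]
    ring

theorem pvOffs_append (cs : List Int) (c : Int) :
    pvOffs (cs ++ [c]) = pvOffs cs ++ [cs.sum] := by
  induction cs with
  | nil => simp [pvOffs]
  | cons c' t ih => simp [pvOffs, ih]

theorem pv_offs_ps_aux (t : List Int) (h : Int) :
    (pvOffs t).map (h + ·) ++ [h + t.sum] = h :: pvPS t h := by
  induction t generalizing h with
  | nil => simp [pvOffs, pvPS]
  | cons c t ih =>
    simp only [pvOffs, pvPS, List.map_cons, List.map_map, List.cons_append, List.sum_cons]
    have := ih (h + c)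
    simp only [List.cons.injEq]
    constructor
    · simp
    · rw [← this]
      congr 1
      · apply List.map_congr_left; intro x _; simp [Function.comp]; ring
      · congr 1; ring

theorem pv_offs_ps (cs : List Int) :
    pvOffs cs ++ [cs.sum] = 0 :: pvPS cs 0 := by
  have := pv_offs_ps_aux cs 0
  simpa using this

theorem pv_set_replicate (j : Nat) (rest : List Int) (v : Int) :
    (List.replicate (j + 1) (0 : Int) ++ rest).set j v
      = List.replicate j (0 : Int) ++ v :: rest := by
  induction j with
  | zero => simp
  | succ j ih =>
    have h1 : List.replicate (j + 1 + 1) (0 : Int) ++ rest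
        = 0 :: (List.replicate (j + 1) (0 : Int) ++ rest) := by simp [List.replicate_succ]
    rw [h1, List.set_cons_succ, ih]
    simp [List.replicate_succ]

theorem pvSN_append (ys : List (List (Int × Int))) (d : List (Int × Int)) :
    pvSN (ys ++ [d]) = pvSN ys + (PySem.Dict.ofList d).items.length := by
  simp [pvSN]

theorem pv_total_cast (xs : List (List (Int × Int))) :
    (xs.map (fun l => ((PySem.Dict.ofList l).size : Int))).sum = (pvSN xs : Int) := by
  induction xs with
  | nil => simp [pvSN]
  | cons a t ih => simp [pvSN, PySem.Dict.size] at ih ⊢; omega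

theorem pv_inner_B (items : List (Int × Int)) (m : Nat) (ra rw : List Int) :
    items.reverse.foldl pvInnerB
      (List.replicate (m + items.length) (0 : Int) ++ ra,
       List.replicate (m + items.length) (0 : Int) ++ rw,
       ((m + items.length : Nat) : Int))
    = (List.replicate m (0 : Int) ++ items.map (·.1) ++ ra,
       List.replicate m (0 : Int) ++ items.map (·.2) ++ rw,
       (m : Int)) := by
  induction items using List.reverseRecOn generalizing ra rw with
  | nil => simp
  | append_singleton ys kv ih =>
    rw [List.reverse_append, List.reverse_singleton, List.singleton_append, List.foldl_cons]
    have hp : ((m + (ys ++ [kv]).length : Nat) : Int) - 1 = ((m + ys.length : Nat) : Int) := by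
      simp only [List.length_append, List.length_cons, List.length_nil]; push_cast; ring
    show (ys.reverse.foldl pvInnerB (pvInnerB _ kv)) = _
    have hstep : pvInnerB
        (List.replicate (m + (ys ++ [kv]).length) (0 : Int) ++ ra,
         List.replicate (m + (ys ++ [kv]).length) (0 : Int) ++ rw,
         ((m + (ys ++ [kv]).length : Nat) : Int)) kv
      = (List.replicate (m + ys.length) (0 : Int) ++ kv.1 :: ra,
         List.replicate (m + ys.length) (0 : Int) ++ kv.2 :: rw,
         ((m + ys.length : Nat) : Int)) := by
      simp only [pvInnerB, hp, PySem.List.pySetD_natCast]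
      have hlen : m + (ys ++ [kv]).length = (m + ys.length) + 1 := by simp; omega
      rw [hlen, pv_set_replicate, pv_set_replicate]
    rw [hstep, ih]
    simp

theorem pv_getD_prefix (ys : List (List (Int × Int))) (d : List (Int × Int)) (i : Int)
    (h0 : 0 ≤ i) (h : i < ys.length) :
    PySem.List.pyGetD (ys ++ [d]) i [] = PySem.List.pyGetD ys i [] := by
  rw [PySem.List.pyGetD_of_nonneg _ _ h0, PySem.List.pyGetD_of_nonneg _ _ h0]
  have hi : i.toNat < ys.length := by omega
  simp [List.getD, List.getElem?_append_left hi]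

theorem pv_drop_set (xs : List Int) (n : Nat) (v : Int) (h : n < xs.length) :
    (xs.set n v).drop n = v :: xs.drop (n + 1) := by
  induction xs generalizing n with
  | nil => simp at h
  | cons a t ih =>
    cases n with
    | zero => simp
    | succ n => simp only [List.set_cons_succ, List.drop_succ_cons]; exact ih n (by simpa using h)

theorem pv_B_outer (xs : List (List (Int × Int))) (ra rw xadj : List Int)
    (hx : xs.length ≤ xadj.length) :
    (PySem.List.pyRange ((xs.length : Int) - 1) (-1) (-1)).foldl (pvStepB xs)
      (List.replicate (pvSN xs) (0 : Int) ++ ra,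
       List.replicate (pvSN xs) (0 : Int) ++ rw,
       xadj, (pvSN xs : Int))
    = ((xs.map PySem.Dict.ofList).flatMap PySem.Dict.keys ++ ra,
       (xs.map PySem.Dict.ofList).flatMap PySem.Dict.values ++ rw,
       pvOffs ((xs.map PySem.Dict.ofList).map (fun d => (d.size : Int))) ++ xadj.drop xs.length,
       0) := by
  induction xs using List.reverseRecOn generalizing ra rw xadj with
  | nil =>
    rw [PySem.List.pyRange_neg_one_eq_nil (by norm_num)]
    simp [pvSN, pvOffs]
  | append_singleton ys d ih =>
    have hlen : ((ys ++ [d]).length : Int) - 1 = (ys.length : Int) := by simp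
    rw [hlen, PySem.List.pyRange_neg_one_cons (by omega), List.foldl_cons]
    -- the first iteration handles index ys.length, i.e. the dict d
    have hget : PySem.List.pyGetD (ys ++ [d]) ((ys.length : Int)) [] = d := by
      rw [PySem.List.pyGetD_of_nonneg _ _ (by omega)]
      simp [List.getD]
    have hstep : pvStepB (ys ++ [d])
        (List.replicate (pvSN (ys ++ [d])) (0 : Int) ++ ra,
         List.replicate (pvSN (ys ++ [d])) (0 : Int) ++ rw,
         xadj, (pvSN (ys ++ [d]) : Int)) ((ys.length : Int))
      = (List.replicate (pvSN ys) (0 : Int) ++ ((PySem.Dict.ofList d).keys ++ ra),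
         List.replicate (pvSN ys) (0 : Int) ++ ((PySem.Dict.ofList d).values ++ rw),
         xadj.set ys.length ((pvSN ys : Nat) : Int),
         ((pvSN ys : Nat) : Int)) := by
      simp only [pvStepB, hget]
      rw [pvSN_append]
      have := pv_inner_B (PySem.Dict.ofList d).items (pvSN ys) ra rw
      simp only [this]
      simp [PySem.Dict.keys, PySem.Dict.values]
    rw [hstep]
    -- in the remaining iterations pvStepB (ys ++ [d]) acts as pvStepB ys
    have hcongr : (PySem.List.pyRange ((ys.length : Int) - 1) (-1) (-1)).foldl
          (pvStepB (ys ++ [d]))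
          (List.replicate (pvSN ys) (0 : Int) ++ ((PySem.Dict.ofList d).keys ++ ra),
           List.replicate (pvSN ys) (0 : Int) ++ ((PySem.Dict.ofList d).values ++ rw),
           xadj.set ys.length ((pvSN ys : Nat) : Int),
           ((pvSN ys : Nat) : Int))
        = (PySem.List.pyRange ((ys.length : Int) - 1) (-1) (-1)).foldl (pvStepB ys)
          (List.replicate (pvSN ys) (0 : Int) ++ ((PySem.Dict.ofList d).keys ++ ra),
           List.replicate (pvSN ys) (0 : Int) ++ ((PySem.Dict.ofList d).values ++ rw),
           xadj.set ys.length ((pvSN ys : Nat) : Int),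
           ((pvSN ys : Nat) : Int)) := by
      apply PySem.List.foldl_congr_mem
      intro acc i hi
      rw [PySem.List.mem_pyRange_neg_one] at hi
      unfold pvStepB
      rw [pv_getD_prefix ys d i (by omega) (by omega)]
    rw [hcongr, ih _ _ _ (by simp only [List.length_set]; simp at hx; omega)]
    have hdrop : (xadj.set ys.length ((pvSN ys : Nat) : Int)).drop ys.length
        = ((pvSN ys : Nat) : Int) :: xadj.drop (ys.length + 1) := by
      exact pv_drop_set xadj ys.length _ (by simp at hx; omega)
    rw [hdrop]
    have hsum2 : (List.map ((fun d => ((d.size : Int))) ∘ PySem.Dict.ofList) ys).sum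
        = ((pvSN ys : Nat) : Int) := pv_total_cast ys
    simp [List.flatMap_append, pvOffs_append, hsum2, List.append_assoc]

-- ===== VERDICT (by name: the statement is the Claim_ definition above) =====
theorem transformAdjHashTo3List_spec : Claim_equal_transformAdjHashTo3List := by
  intro adj_hash _
  show transformAdjHashTo3List adj_hash = transformAdjHashTo3List_alt adj_hash
  unfold transformAdjHashTo3List transformAdjHashTo3List_alt
  rw [pv_A_fold]
  simp only [pv_total_cast, Int.toNat_natCast, PySem.List.pySetD_natCast]
  rw [← List.append_nil (List.replicate (pvSN adj_hash) (0 : Int))]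
  rw [pv_B_outer adj_hash [] [] _ (by simp only [List.length_set, List.length_replicate]; omega)]
  have hdrop : ((List.replicate (adj_hash.length + 1) (0 : Int)).set adj_hash.length
      ((pvSN adj_hash : Nat) : Int)).drop adj_hash.length
      = [((pvSN adj_hash : Nat) : Int)] := by
    rw [pv_drop_set _ _ _ (by simp)]
    simp
  rw [hdrop]
  have hsum : ((adj_hash.map PySem.Dict.ofList).map (fun d => (d.size : Int))).sum
      = ((pvSN adj_hash : Nat) : Int) := by
    rw [List.map_map]; exact pv_total_cast adj_hash
  have hps := pv_offs_ps ((adj_hash.map PySem.Dict.ofList).map (fun d => (d.size : Int)))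
  rw [hsum] at hps
  simp only [List.map_map] at hps
  simp [hps]
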